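-- pv_equiv track=rewrite | github.com/tbtrung39/KHDL_K17A3_LAB | lab07/lab7/16.py | tim_cap_chi_so
-- ===== SOURCE A (Python) =====
-- def tim_cap_chi_so(a):
--     n = len(a)
--     cap_chi_so = []
--     for i in range(n):
--         for j in range(i+1, n):
--             if a[j] + 1 == a[i]:
--                 cap_chi_so.append((i, j))
--     return cap_chi_so
-- ===== SOURCE B (Python) =====
-- def tim_cap_chi_so(a):
--     # one pass builds value -> ascending indices; then for each i only the
--     # bucket of a[i]-1 is scanned (its prefix <= i filtered out), so the
--     # inner rescan of all later elements disappears.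
--     pos = {}
--     for idx, v in enumerate(a):
--         pos.setdefault(v, []).append(idx)
--     out = []
--     for i, v in enumerate(a):
--         for j in pos.get(v - 1, ()):
--             if j > i:
--                 out.append((i, j))
--     return out
-- ===== Notes on version B (the rewrite author's own statement) =====
-- stated objective: faster
-- what changed: Replaces the nested scan over all later elements by a one-pass dict from value to its ascending index list, so each i only walks the bucket of a[i]-1 (same emission order).
import Mathlib
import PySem

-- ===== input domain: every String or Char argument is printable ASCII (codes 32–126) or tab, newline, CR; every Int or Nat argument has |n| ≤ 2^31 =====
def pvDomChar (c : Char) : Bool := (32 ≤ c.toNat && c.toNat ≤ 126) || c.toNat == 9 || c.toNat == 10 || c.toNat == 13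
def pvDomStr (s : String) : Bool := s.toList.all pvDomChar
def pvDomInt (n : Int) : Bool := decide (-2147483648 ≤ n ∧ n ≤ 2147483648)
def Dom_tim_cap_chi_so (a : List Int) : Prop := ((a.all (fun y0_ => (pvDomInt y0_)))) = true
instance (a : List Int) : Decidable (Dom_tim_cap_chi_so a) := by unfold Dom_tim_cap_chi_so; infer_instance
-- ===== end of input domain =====

-- B: one pass builds a value -> ascending-indices dict, then each i scans only the bucket of a[i]-1 instead of all later elements (same return value and order).
-- B builds a value -> ascending-index-list dict in one pass and scans only the bucket of a[i]-1 per i (faster in a timing run; same return value and order).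
-- ===== PORT A =====
def tim_cap_chi_so (a : List Int) : List (Int × Int) :=
  let n : Int := a.length
  (PySem.List.pyRange 0 n 1).foldl (fun acc i =>
    (PySem.List.pyRange (i + 1) n 1).foldl (fun acc j =>
      if PySem.List.pyGetD a j 0 + 1 = PySem.List.pyGetD a i 0 then acc ++ [(i, j)] else acc)
      acc) []

-- ===== PORT B =====
-- pos = {}; for idx, v in enumerate(a): pos.setdefault(v, []).append(idx)
def pvBuildPos (a : List Int) : PySem.Dict Int (List Int) :=
  (PySem.List.enumerate a).foldl
    (fun d p => d.modify p.2 [] (fun l => l ++ [p.1])) PySem.Dict.empty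

def tim_cap_chi_so_alt (a : List Int) : List (Int × Int) :=
  let pos := pvBuildPos a
  (PySem.List.enumerate a).foldl (fun out p =>
    (pos.getD (p.2 - 1) []).foldl (fun out j =>
      if j > p.1 then out ++ [(p.1, j)] else out) out) []

-- ===== PRECONDITION & SPEC =====
def Spec_tim_cap_chi_so (a : List Int) (out : List (Int × Int)) : Prop := out = tim_cap_chi_so_alt a
instance (a : List Int) (out : List (Int × Int)) : Decidable (Spec_tim_cap_chi_so a out) := by unfold Spec_tim_cap_chi_so; infer_instance

-- ===== CLAIM (what is proved, stated in full; the proofs are below) =====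
def Claim_equal_tim_cap_chi_so : Prop := ∀ (a : List Int), Dom_tim_cap_chi_so a → Spec_tim_cap_chi_so a (tim_cap_chi_so a)

-- ===== LEMMAS AND PROOFS =====
-- normal form both ports are reduced to
def pvC (a : List Int) (k : Nat) : List (Int × Int) :=
  ((List.range a.length).filter
      (fun (m : Nat) => decide ((k : Int) < (m : Int)) && (a.getD m 0 == a.getD k 0 - 1))).map
    (fun (m : Nat) => ((k : Int), (m : Int)))

lemma enum_eq (xs : List Int) (s : Int) :
    PySem.List.enumerate xs s
      = (List.range xs.length).map (fun (k : Nat) => (s + (k : Int), xs.getD k 0)) := by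
  induction xs generalizing s with
  | nil => simp [PySem.List.enumerate_nil]
  | cons x xs ih =>
      simp only [PySem.List.enumerate_cons, ih, List.length_cons, List.range_succ_eq_map,
        List.map_cons, List.map_map]
      congr 1
      · simp
      · apply List.map_congr_left
        intro k _
        simp only [Function.comp_apply, List.getD_cons_succ]
        congr 1
        push_cast
        ring

lemma enum_eq0 (a : List Int) :
    PySem.List.enumerate a
      = (List.range a.length).map (fun (k : Nat) => ((k : Int), a.getD k 0)) := by
  rw [enum_eq]
  simp

lemma pyRange_tail_filter (i n : Int) (h0 : 0 ≤ i) (h1 : i < n) :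
    PySem.List.pyRange (i + 1) n
      = (PySem.List.pyRange 0 n).filter (fun j => decide (i < j)) := by
  rw [PySem.List.pyRange_one_append 0 (i + 1) n (by omega) (by omega), List.filter_append]
  rw [List.filter_eq_nil_iff.mpr, List.filter_eq_self.mpr]
  · simp
  · intro x hx
    simp only [decide_eq_true_eq]
    exact (PySem.List.mem_pyRange_one.mp hx).1.trans_lt' (by omega)
  · intro x hx
    have := (PySem.List.mem_pyRange_one.mp hx).2
    simp only [decide_eq_true_eq]
    omega

lemma bucket_eq (a : List Int) (w : Int) :
    (pvBuildPos a).getD w []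
      = ((List.range a.length).filter (fun (m : Nat) => a.getD m 0 == w)).map (fun (m : Nat) => (m : Int)) := by
  unfold pvBuildPos
  have h : PySem.List.enumerate a
      = ((List.range a.length).map (fun (k : Nat) => (a.getD k 0, (k : Int)))).map Prod.swap := by
    rw [enum_eq0, List.map_map]
    rfl
  rw [h, List.foldl_map]
  simp only [Prod.fst_swap, Prod.snd_swap]
  rw [PySem.Dict.getD_foldl_modify_append]
  simp [List.filter_map, List.map_map, Function.comp_def]

lemma A_eq (a : List Int) :
    tim_cap_chi_so a = (List.range a.length).foldl (fun acc k => acc ++ pvC a k) [] := by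
  unfold tim_cap_chi_so
  show (PySem.List.pyRange 0 (a.length : Int) 1).foldl _ [] = _
  rw [PySem.List.pyRange_zero_nat, List.foldl_map]
  apply PySem.List.foldl_congr_mem
  intro acc k hk
  have hk' : k < a.length := List.mem_range.mp hk
  have hite : (fun (acc : List (Int × Int)) (j : Int) =>
      if PySem.List.pyGetD a j 0 + 1 = PySem.List.pyGetD a (k : Int) 0 then acc ++ [((k : Int), j)] else acc)
      = (fun acc j =>
      if (decide (PySem.List.pyGetD a j 0 + 1 = PySem.List.pyGetD a (k : Int) 0)) = true
        then acc ++ [((k : Int), j)] else acc) := by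
    funext acc j
    simp
  rw [hite, PySem.List.foldl_append_if]
  congr 1
  rw [pyRange_tail_filter (k : Int) (a.length : Int) (by positivity) (by exact_mod_cast hk'),
    List.filter_filter, PySem.List.pyRange_zero_nat, List.filter_map, List.map_map]
  unfold pvC
  simp only [Function.comp_def]
  congr 1
  apply List.filter_congr
  intro m hm
  simp only [PySem.List.pyGetD_natCast]
  by_cases hkm : (k : Int) < (m : Int) <;> simp [hkm]
  rw [Bool.eq_iff_iff]
  simp only [decide_eq_true_eq, beq_iff_eq]
  omega

lemma B_eq (a : List Int) :
    tim_cap_chi_so_alt a = (List.range a.length).foldl (fun acc k => acc ++ pvC a k) [] := by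
  unfold tim_cap_chi_so_alt
  show (PySem.List.enumerate a).foldl _ [] = _
  rw [enum_eq0, List.foldl_map]
  apply PySem.List.foldl_congr_mem
  intro acc k hk
  dsimp only
  have hite : (fun (out : List (Int × Int)) (j : Int) =>
      if j > (k : Int) then out ++ [((k : Int), j)] else out)
      = (fun out j => if (decide ((k : Int) < j)) = true then out ++ [((k : Int), j)] else out) := by
    funext out j
    simp
  rw [hite, PySem.List.foldl_append_if, bucket_eq]
  congr 1
  rw [List.filter_map, List.filter_filter, List.map_map]
  unfold pvC
  simp only [Function.comp_def]

-- ===== VERDICT (by name: the statement is the Claim_ definition above) =====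
theorem tim_cap_chi_so_spec : Claim_equal_tim_cap_chi_so := by
  intro a _
  unfold Spec_tim_cap_chi_so
  rw [A_eq, B_eq]
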